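-- pv_equiv track=rewrite | github.com/rwelab/UCDataImputer | UCDataImputer/model_selection.py | adjust_features_based_on_model
-- ===== SOURCE A (Python) =====
-- def adjust_features_based_on_model(model_features, model_filename):
--     """
--     Adjust the model features based on the model filename by keeping only relevant features.
--     Parameters:
--     - model_features: List of all possible features in the correct order.
--     - model_filename: The filename of the model being used.
--
--     Returns:
--     - List of relevant features in the same order as model_features.
--     """
--     # Keywords to identify relevant features from the model filename
--     keywords_to_features = {
--         'crp': ['CRP_mg/L'],
--         'stool': ['STOOLFRQ_score'],
--         'rec': ['RECBLEED_score'],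
--         'endsps': ['ENDSPS'],
--         'demo': ['AGE', 'BMI_kg/m2', 'HEIGHT_cm', 'WEIGHT_kg',
--                  'RACE_Asian', 'RACE_Black', 'RACE_Others', 'RACE_White',
--                  'SEX_F', 'SEX_M', 'SMOKING_EX-USER', 'SMOKING_NEVER USED', 'SMOKING_USER']
--     }
--
--     # Determine relevant features based on keywords in the model filename
--     relevant_features = set()
--     for keyword, features in keywords_to_features.items():
--         if keyword.lower() in model_filename.lower():  # Case-insensitive matching
--             relevant_features.update(features)
--
--     # Always include 'TREATMENT_PHASE' since it is present in every model
--     relevant_features.add('TREATMENT_PHASE')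
--
--     # Filter the model_features list to keep only relevant features, maintaining the original order
--     adjusted_features = [feature for feature in model_features if feature in relevant_features]
--
--     return adjusted_features
-- ===== SOURCE B (Python) =====
-- # B: one pass with an explicit accumulator and no keyword-detection phase: instead of
-- # first scanning the filename for every keyword and building a set of relevant features,
-- # each feature is decided on the spot (via a feature->keyword index and a lazy substring
-- # test against the lowered filename).
--
-- _FEATURE_KEYWORD = {
--     'CRP_mg/L': 'crp',
--     'STOOLFRQ_score': 'stool',
--     'RECBLEED_score': 'rec',
--     'ENDSPS': 'endsps',
--     'AGE': 'demo', 'BMI_kg/m2': 'demo', 'HEIGHT_cm': 'demo', 'WEIGHT_kg': 'demo',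
--     'RACE_Asian': 'demo', 'RACE_Black': 'demo', 'RACE_Others': 'demo', 'RACE_White': 'demo',
--     'SEX_F': 'demo', 'SEX_M': 'demo', 'SMOKING_EX-USER': 'demo',
--     'SMOKING_NEVER USED': 'demo', 'SMOKING_USER': 'demo',
-- }
--
--
-- def adjust_features_based_on_model(model_features, model_filename):
--     name = model_filename.lower()
--     out = []
--     for f in model_features:
--         if f == 'TREATMENT_PHASE':
--             out.append(f)
--         else:
--             kw = _FEATURE_KEYWORD.get(f)
--             if kw is not None and kw in name:
--                 out.append(f)
--     return out
-- ===== Notes on version B (the rewrite author's own statement) =====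
-- stated objective: alternative
-- what changed: Removes A's keyword-detection phase entirely: instead of scanning the filename for every keyword to accumulate a set of relevant features and then filtering, B makes a single pass with an explicit accumulator and decides each feature on the spot via a static feature->keyword index and a lazy substring test of that one keyword in the lowered filename.
import Mathlib
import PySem

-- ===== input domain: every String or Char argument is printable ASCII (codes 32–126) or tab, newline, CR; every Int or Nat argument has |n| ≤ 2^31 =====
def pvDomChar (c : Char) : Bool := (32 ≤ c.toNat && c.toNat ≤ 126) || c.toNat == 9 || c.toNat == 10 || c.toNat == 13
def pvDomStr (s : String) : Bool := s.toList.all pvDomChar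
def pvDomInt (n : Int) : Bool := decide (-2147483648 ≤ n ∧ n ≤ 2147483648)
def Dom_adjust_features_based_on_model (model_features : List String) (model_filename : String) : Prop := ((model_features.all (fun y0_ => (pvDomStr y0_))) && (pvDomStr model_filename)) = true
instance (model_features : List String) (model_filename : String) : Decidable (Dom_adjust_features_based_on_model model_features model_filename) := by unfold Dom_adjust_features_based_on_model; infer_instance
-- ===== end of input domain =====

-- B drops A's keyword-detection/set-accumulation phase: a single accumulator pass deciding each
-- feature on the spot via a feature→keyword index and a lazy substring test; objective: alternative.

-- ===== PORT A =====
def pvKeywordsToFeatures : List (String × List String) :=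
  [("crp", ["CRP_mg/L"]),
   ("stool", ["STOOLFRQ_score"]),
   ("rec", ["RECBLEED_score"]),
   ("endsps", ["ENDSPS"]),
   ("demo", ["AGE", "BMI_kg/m2", "HEIGHT_cm", "WEIGHT_kg",
             "RACE_Asian", "RACE_Black", "RACE_Others", "RACE_White",
             "SEX_F", "SEX_M", "SMOKING_EX-USER", "SMOKING_NEVER USED", "SMOKING_USER"])]

def adjust_features_based_on_model (model_features : List String) (model_filename : String) : List String :=
  let relevant0 : PySem.Set String :=
    pvKeywordsToFeatures.foldl
      (fun s kf =>
        if PySem.Str.isIn (PySem.Str.lower kf.1) (PySem.Str.lower model_filename)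
        then PySem.Set.update s kf.2 else s)
      PySem.Set.empty
  let relevant_features := PySem.Set.add relevant0 "TREATMENT_PHASE"
  model_features.filter (fun feature => PySem.Set.contains relevant_features feature)

-- ===== PORT B =====
def pvFeatureKeyword : PySem.Dict String String :=
  PySem.Dict.ofList
    [("CRP_mg/L", "crp"),
     ("STOOLFRQ_score", "stool"),
     ("RECBLEED_score", "rec"),
     ("ENDSPS", "endsps"),
     ("AGE", "demo"), ("BMI_kg/m2", "demo"), ("HEIGHT_cm", "demo"), ("WEIGHT_kg", "demo"),
     ("RACE_Asian", "demo"), ("RACE_Black", "demo"), ("RACE_Others", "demo"), ("RACE_White", "demo"),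
     ("SEX_F", "demo"), ("SEX_M", "demo"), ("SMOKING_EX-USER", "demo"),
     ("SMOKING_NEVER USED", "demo"), ("SMOKING_USER", "demo")]

-- Python's for-loop with `out.append` is the foldl over the accumulator; `.get` yielding
-- None for unknown f is the `none` branch (feature dropped).
def adjust_features_based_on_model_alt (model_features : List String) (model_filename : String) : List String :=
  let name := PySem.Str.lower model_filename
  model_features.foldl
    (fun out f =>
      if f == "TREATMENT_PHASE" then out ++ [f]
      else match pvFeatureKeyword.get? f with
        | some kw => if PySem.Str.isIn kw name then out ++ [f] else out
        | none => out)
    []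

-- ===== PRECONDITION & SPEC =====
def Spec_adjust_features_based_on_model (model_features : List String) (model_filename : String) (out : List String) : Prop := out = adjust_features_based_on_model_alt model_features model_filename
instance (model_features : List String) (model_filename : String) (out : List String) : Decidable (Spec_adjust_features_based_on_model model_features model_filename out) := by unfold Spec_adjust_features_based_on_model; infer_instance

-- ===== CLAIM (what is proved, stated in full; the proofs are below) =====
def Claim_equal_adjust_features_based_on_model : Prop := ∀ (model_features : List String) (model_filename : String), Dom_adjust_features_based_on_model model_features model_filename → Spec_adjust_features_based_on_model model_features model_filename (adjust_features_based_on_model model_features model_filename)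

-- ===== LEMMAS AND PROOFS =====

-- B's per-feature keep test, as a predicate
def pvKeepB (model_filename f : String) : Bool :=
  f == "TREATMENT_PHASE" ||
    (match pvFeatureKeyword.get? f with
     | some kw => PySem.Str.isIn kw (PySem.Str.lower model_filename)
     | none => false)

-- all strings either port can ever keep
def pvAllFeats : List String :=
  ["TREATMENT_PHASE", "CRP_mg/L", "STOOLFRQ_score", "RECBLEED_score", "ENDSPS",
   "AGE", "BMI_kg/m2", "HEIGHT_cm", "WEIGHT_kg",
   "RACE_Asian", "RACE_Black", "RACE_Others", "RACE_White",
   "SEX_F", "SEX_M", "SMOKING_EX-USER", "SMOKING_NEVER USED", "SMOKING_USER"]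


-- pvFeatureKeyword.get? evaluated on each known feature
lemma pv_get_all :
    pvFeatureKeyword.get? "TREATMENT_PHASE" = none ∧
    pvFeatureKeyword.get? "CRP_mg/L" = some "crp" ∧
    pvFeatureKeyword.get? "STOOLFRQ_score" = some "stool" ∧
    pvFeatureKeyword.get? "RECBLEED_score" = some "rec" ∧
    pvFeatureKeyword.get? "ENDSPS" = some "endsps" ∧
    pvFeatureKeyword.get? "AGE" = some "demo" ∧
    pvFeatureKeyword.get? "BMI_kg/m2" = some "demo" ∧
    pvFeatureKeyword.get? "HEIGHT_cm" = some "demo" ∧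
    pvFeatureKeyword.get? "WEIGHT_kg" = some "demo" ∧
    pvFeatureKeyword.get? "RACE_Asian" = some "demo" ∧
    pvFeatureKeyword.get? "RACE_Black" = some "demo" ∧
    pvFeatureKeyword.get? "RACE_Others" = some "demo" ∧
    pvFeatureKeyword.get? "RACE_White" = some "demo" ∧
    pvFeatureKeyword.get? "SEX_F" = some "demo" ∧
    pvFeatureKeyword.get? "SEX_M" = some "demo" ∧
    pvFeatureKeyword.get? "SMOKING_EX-USER" = some "demo" ∧
    pvFeatureKeyword.get? "SMOKING_NEVER USED" = some "demo" ∧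
    pvFeatureKeyword.get? "SMOKING_USER" = some "demo" := by decide

-- A's membership test agrees pointwise with B's keep test
lemma pv_pointwise (model_filename f : String) :
    PySem.Set.contains
      (PySem.Set.add
        (pvKeywordsToFeatures.foldl
          (fun s kf =>
            if PySem.Str.isIn (PySem.Str.lower kf.1) (PySem.Str.lower model_filename)
            then PySem.Set.update s kf.2 else s)
          PySem.Set.empty) "TREATMENT_PHASE") f
    = pvKeepB model_filename f := by
  have e1 : PySem.Str.lower "crp" = "crp" := by decide
  have e2 : PySem.Str.lower "stool" = "stool" := by decide
  have e3 : PySem.Str.lower "rec" = "rec" := by decide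
  have e4 : PySem.Str.lower "endsps" = "endsps" := by decide
  have e5 : PySem.Str.lower "demo" = "demo" := by decide
  simp only [pvKeywordsToFeatures, List.foldl, e1, e2, e3, e4, e5, pvKeepB]
  by_cases hf : f ∈ pvAllFeats
  · fin_cases hf <;>
      cases h1 : PySem.Str.isIn "crp" (PySem.Str.lower model_filename) <;>
      cases h2 : PySem.Str.isIn "stool" (PySem.Str.lower model_filename) <;>
      cases h3 : PySem.Str.isIn "rec" (PySem.Str.lower model_filename) <;>
      cases h4 : PySem.Str.isIn "endsps" (PySem.Str.lower model_filename) <;>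
      cases h5 : PySem.Str.isIn "demo" (PySem.Str.lower model_filename) <;>
      simp only [pv_get_all.1, pv_get_all.2.1, pv_get_all.2.2.1, pv_get_all.2.2.2.1,
        pv_get_all.2.2.2.2.1, pv_get_all.2.2.2.2.2.1, pv_get_all.2.2.2.2.2.2.1,
        pv_get_all.2.2.2.2.2.2.2.1, pv_get_all.2.2.2.2.2.2.2.2.1,
        pv_get_all.2.2.2.2.2.2.2.2.2.1, pv_get_all.2.2.2.2.2.2.2.2.2.2.1,
        pv_get_all.2.2.2.2.2.2.2.2.2.2.2.1, pv_get_all.2.2.2.2.2.2.2.2.2.2.2.2.1,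
        pv_get_all.2.2.2.2.2.2.2.2.2.2.2.2.2.1, pv_get_all.2.2.2.2.2.2.2.2.2.2.2.2.2.2.1,
        pv_get_all.2.2.2.2.2.2.2.2.2.2.2.2.2.2.2.1, pv_get_all.2.2.2.2.2.2.2.2.2.2.2.2.2.2.2.2.1,
        pv_get_all.2.2.2.2.2.2.2.2.2.2.2.2.2.2.2.2.2] <;>
      (try simp only [h1, h2, h3, h4, h5]) <;> decide
  · simp only [pvAllFeats, List.mem_cons, not_or] at hf
    obtain ⟨n1,n2,n3,n4,n5,n6,n7,n8,n9,n10,n11,n12,n13,n14,n15,n16,n17,n18,-⟩ := hf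
    have hd : pvFeatureKeyword = PySem.Dict.mk
      [("CRP_mg/L", "crp"),("STOOLFRQ_score", "stool"),("RECBLEED_score", "rec"),("ENDSPS", "endsps"),
       ("AGE", "demo"), ("BMI_kg/m2", "demo"), ("HEIGHT_cm", "demo"), ("WEIGHT_kg", "demo"),
       ("RACE_Asian", "demo"), ("RACE_Black", "demo"), ("RACE_Others", "demo"), ("RACE_White", "demo"),
       ("SEX_F", "demo"), ("SEX_M", "demo"), ("SMOKING_EX-USER", "demo"),
       ("SMOKING_NEVER USED", "demo"), ("SMOKING_USER", "demo")] := by decide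
    have hg : pvFeatureKeyword.get? f = none := by
      simp [hd, PySem.Dict.get?_mk_cons, PySem.Dict.get?, PySem.Dict.items,
            Ne.symm n2, Ne.symm n3, Ne.symm n4, Ne.symm n5, Ne.symm n6, Ne.symm n7, Ne.symm n8,
            Ne.symm n9, Ne.symm n10, Ne.symm n11, Ne.symm n12, Ne.symm n13, Ne.symm n14, Ne.symm n15,
            Ne.symm n16, Ne.symm n17, Ne.symm n18]
    rw [hg]
    cases h1 : PySem.Str.isIn "crp" (PySem.Str.lower model_filename) <;>
      cases h2 : PySem.Str.isIn "stool" (PySem.Str.lower model_filename) <;>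
      cases h3 : PySem.Str.isIn "rec" (PySem.Str.lower model_filename) <;>
      cases h4 : PySem.Str.isIn "endsps" (PySem.Str.lower model_filename) <;>
      cases h5 : PySem.Str.isIn "demo" (PySem.Str.lower model_filename) <;>
      simp only [h1, h2, h3, h4, h5, if_true, if_false, Bool.false_eq_true, ite_false, ite_true] <;>
      simp [PySem.Set.contains, PySem.Set.add, PySem.Set.update, PySem.Set.ofList, PySem.Set.empty,
            n1, n2, n3, n4, n5, n6, n7, n8, n9, n10, n11, n12, n13, n14, n15, n16, n17, n18]

-- B's accumulator step is an append-if on pvKeepB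
lemma pv_step_eq (model_filename : String) (out : List String) (f : String) :
    (if f == "TREATMENT_PHASE" then out ++ [f]
     else match pvFeatureKeyword.get? f with
       | some kw => if PySem.Str.isIn kw (PySem.Str.lower model_filename) then out ++ [f] else out
       | none => out)
    = (if pvKeepB model_filename f then out ++ [f] else out) := by
  unfold pvKeepB
  by_cases h : (f == "TREATMENT_PHASE") = true
  · simp [h]
  · simp only [h, Bool.false_eq_true, if_false, Bool.false_or]
    cases hg : pvFeatureKeyword.get? f with
    | none => simp
    | some kw => by_cases hi : PySem.Str.isIn kw (PySem.Str.lower model_filename) = true <;> simp [hi]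

-- the accumulator fold computes acc ++ filter
lemma pv_foldl_filter (p : String → Bool) :
    ∀ (l acc : List String),
      l.foldl (fun out f => if p f then out ++ [f] else out) acc = acc ++ l.filter p := by
  intro l
  induction l with
  | nil => intro acc; simp
  | cons x xs ih =>
      intro acc
      by_cases h : p x = true <;> simp [List.foldl, h, ih, List.filter_cons]

-- ===== VERDICT (by name: the statement is the Claim_ definition above) =====
theorem adjust_features_based_on_model_spec : Claim_equal_adjust_features_based_on_model := by
  intro model_features model_filename _
  unfold Spec_adjust_features_based_on_model
  unfold adjust_features_based_on_model adjust_features_based_on_model_alt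
  have hstep : (fun (out : List String) (f : String) =>
      if f == "TREATMENT_PHASE" then out ++ [f]
      else match pvFeatureKeyword.get? f with
        | some kw => if PySem.Str.isIn kw (PySem.Str.lower model_filename) then out ++ [f] else out
        | none => out)
      = (fun out f => if pvKeepB model_filename f then out ++ [f] else out) :=
    funext fun out => funext fun f => pv_step_eq model_filename out f
  simp only [hstep, pv_foldl_filter (pvKeepB model_filename) model_features [], List.nil_append]
  exact (List.filter_congr (fun f _ => pv_pointwise model_filename f))
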